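-- pv_equiv track=rewrite | github.com/vasylcherepushko/Codewars | down_arrow_with_numbers.py | get_a_down_arrow_of
-- ===== SOURCE A (Python) =====
-- def get_a_down_arrow_of(n):
--     digits = '1234567890'
--     res = ''
--     for i in range(n, 0, -1):
--         repeat, rest = divmod((2 * i - 1) // 2, 10)
--         mid = digits[rest]
--         start = digits * repeat + digits[:rest]
--         end = start[::-1]
--         res += ' ' * (n - i) + start + mid + end + '\n'
--     return res.rstrip()
-- ===== SOURCE B (Python) =====
-- def get_a_down_arrow_of(n):
--     rows = []
--     left = ''
--     for i in range(1, n + 1):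
--         d = str((len(left) + 1) % 10)
--         rows.append(' ' * (n - i) + left + d + left[::-1])
--         left += d
--     return '\n'.join(reversed(rows))
-- ===== Notes on version B (the rewrite author's own statement) =====
-- stated objective: alternative
-- what changed: B iterates bottom-up (i=1..n) threading a growing left-half accumulator so each row reuses the previous one's digits (no per-row divmod/repeat/slice recomputation), collects rows in a list and joins the reversed list with newlines instead of concatenating top-down and rstrip-ping.
import Mathlib
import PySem

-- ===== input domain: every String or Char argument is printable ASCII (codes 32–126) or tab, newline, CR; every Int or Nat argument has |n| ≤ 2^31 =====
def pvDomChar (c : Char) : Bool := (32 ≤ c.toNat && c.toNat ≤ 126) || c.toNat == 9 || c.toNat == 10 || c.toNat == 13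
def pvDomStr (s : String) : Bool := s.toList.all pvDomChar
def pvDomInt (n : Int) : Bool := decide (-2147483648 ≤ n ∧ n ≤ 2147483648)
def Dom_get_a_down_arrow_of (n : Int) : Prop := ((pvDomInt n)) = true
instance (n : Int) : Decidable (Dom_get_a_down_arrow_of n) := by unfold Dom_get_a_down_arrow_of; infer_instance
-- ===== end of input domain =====

-- B builds the arrow bottom-up, growing a left-half accumulator so each row reuses the previous
-- digits (no per-row divmod/repeat/slice recomputation), then joins the reversed row list.

-- ===== PORT A =====
-- 'digits * repeat' (string repetition; empty for repeat <= 0, as in Python)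
def pyStrMulN (s : List Char) : Nat → List Char
  | 0 => []
  | Nat.succ k => s ++ pyStrMulN s k

def pyStrMul (s : List Char) (k : Int) : List Char := pyStrMulN s k.toNat

-- the body of A's 'for i in range(n, 0, -1)' loop; divmod(x, 10) ported as floordiv/mod (divisor 10 ≠ 0)
def pvBodyA (n : Int) (res : List Char) (i : Int) : List Char :=
  let digits : List Char := "1234567890".toList
  let q := PySem.Int.floordiv (2 * i - 1) 2
  let rep := PySem.Int.floordiv q 10
  let rest := PySem.Int.mod q 10
  let mid := (PySem.List.pyGet? digits rest).getD ' '   -- 0 ≤ rest < 10: never IndexError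
  let start := pyStrMul digits rep ++ PySem.List.slice digits none (some rest)
  let endr := (PySem.List.slice? start none none (-1)).getD []   -- start[::-1]
  res ++ List.replicate (n - i).toNat ' ' ++ start ++ [mid] ++ endr ++ ['\n']

def get_a_down_arrow_of (n : Int) : String :=
  String.ofList (PySem.Chars.rstrip ((PySem.List.pyRange n 0 (-1)).foldl (pvBodyA n) []))

-- ===== PORT B =====
-- the body of B's 'for i in range(1, n + 1)' loop: acc = (rows, left)
def pvBodyB (n : Int) (acc : List (List Char) × List Char) (i : Int) :
    List (List Char) × List Char :=
  let rows := acc.1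
  let left := acc.2
  let d := PySem.Int.toChars (PySem.Int.mod (PySem.List.len left + 1) 10)
  (rows ++ [List.replicate (n - i).toNat ' ' ++ left ++ d ++
      ((PySem.List.slice? left none none (-1)).getD [])],   -- left[::-1]
   left ++ d)

def get_a_down_arrow_of_alt (n : Int) : String :=
  String.ofList (PySem.Chars.join ['\n']
    (((PySem.List.pyRange 1 (n + 1) 1).foldl (pvBodyB n) ([], [])).1.reverse))

-- ===== PRECONDITION & SPEC =====
def Spec_get_a_down_arrow_of (n : Int) (out : String) : Prop := out = get_a_down_arrow_of_alt n
instance (n : Int) (out : String) : Decidable (Spec_get_a_down_arrow_of n out) := by unfold Spec_get_a_down_arrow_of; infer_instance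

-- ===== CLAIM (what is proved, stated in full; the proofs are below) =====
def Claim_equal_get_a_down_arrow_of : Prop := ∀ (n : Int), Dom_get_a_down_arrow_of n → Spec_get_a_down_arrow_of n (get_a_down_arrow_of n)

-- ===== LEMMAS AND PROOFS =====

-- the k-th digit (0-based) of the repeating sequence 1234567890123…
def dch (m : Nat) : Char := Char.ofNat (48 + (m + 1) % 10)

-- the first m characters of that sequence
def dstr (m : Nat) : List Char := (List.range m).map dch

-- one row of the arrow (without trailing newline), for 1-based level m+1 from the top width n
def rowQ (n : Int) (m : Nat) : List Char :=
  List.replicate (n - ((m : Int) + 1)).toNat ' ' ++ (dstr m ++ ([dch m] ++ (dstr m).reverse))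

theorem length_dstr (m : Nat) : (dstr m).length = m := by simp [dstr]

theorem dch_mod (m : Nat) : dch (m % 10) = dch m := by
  unfold dch; congr 1; omega

theorem digits_eq : "1234567890".toList = dstr 10 := by decide

theorem dstr_succ (m : Nat) : dstr (m + 1) = dstr m ++ [dch m] := by
  simp [dstr, List.range_succ]

theorem dstr_ten_add (m : Nat) : dstr (10 + m) = dstr 10 ++ dstr m := by
  have h : ∀ x : Nat, dch (10 + x) = dch x := by intro x; unfold dch; congr 1; omega
  simp [dstr, List.range_add, List.map_map, Function.comp_def, h]

theorem strMulN_dstr (q r : Nat) : pyStrMulN (dstr 10) q ++ dstr r = dstr (10 * q + r) := by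
  induction q with
  | zero => simp [pyStrMulN]
  | succ q ih =>
      have : 10 * (q + 1) + r = 10 + (10 * q + r) := by ring
      rw [this, dstr_ten_add, pyStrMulN, List.append_assoc, ih]

theorem take_dstr (r : Nat) (h : r ≤ 10) : (dstr 10).take r = dstr r := by
  simp [dstr, ← List.map_take, List.take_range, Nat.min_eq_left h]

theorem digit_toChars : ∀ v : Nat, v < 10 →
    PySem.Int.toChars ((v : Nat) : Int) = [Char.ofNat (48 + v)] := by decide

theorem toChars_dch (t : Nat) :
    PySem.Int.toChars (PySem.Int.mod ((t : Int) + 1) 10) = [dch t] := by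
  have h1 : ((t : Int) + 1) = (((t + 1 : Nat)) : Int) := by push_cast; ring
  have h2 : PySem.Int.mod (((t + 1 : Nat)) : Int) (((10 : Nat)) : Int)
      = ((((t + 1) % 10 : Nat)) : Int) := PySem.Int.mod_natCast _ _
  rw [h1, show (10 : Int) = (((10 : Nat)) : Int) from rfl, h2,
    digit_toChars _ (Nat.mod_lt _ (by norm_num))]
  rfl

theorem bodyA_eq (n : Int) (acc : List Char) (i : Int) (h : 0 < i) :
    pvBodyA n acc i = acc ++ (rowQ n (i - 1).toNat ++ ['\n']) := by
  obtain ⟨m, rfl⟩ : ∃ m : Nat, i = (m : Int) + 1 := ⟨(i - 1).toNat, by omega⟩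
  have hm : ((m : Int) + 1 - 1).toNat = m := by omega
  rw [hm]
  simp only [pvBodyA, digits_eq]
  have hq : PySem.Int.floordiv (2 * ((m : Int) + 1) - 1) 2 = (m : Int) := by
    rw [PySem.Int.floordiv_eq_iff_of_pos (by omega)]; omega
  rw [hq]
  have h2 : PySem.Int.floordiv ((m : Int)) 10 = ((m / 10 : Nat) : Int) := by
    exact_mod_cast PySem.Int.floordiv_natCast m 10
  have h3 : PySem.Int.mod ((m : Int)) 10 = ((m % 10 : Nat) : Int) := by
    exact_mod_cast PySem.Int.mod_natCast m 10
  rw [h2, h3]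
  have hget : (PySem.List.pyGet? (dstr 10) (((m % 10 : Nat)) : Int)).getD ' ' = dch m := by
    rw [PySem.List.pyGet?_natCast]
    simp only [dstr, List.getElem?_map]
    rw [List.getElem?_range (by omega : m % 10 < 10)]
    simp [dch_mod]
  have hslice : PySem.List.slice (dstr 10) none (some (((m % 10 : Nat)) : Int)) = dstr (m % 10) := by
    rw [PySem.List.slice_to_natCast]
    exact take_dstr _ (le_of_lt (Nat.mod_lt m (by norm_num)))
  have hmul : pyStrMul (dstr 10) (((m / 10 : Nat)) : Int) = pyStrMulN (dstr 10) (m / 10) := by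
    simp only [pyStrMul, Int.toNat_natCast]
  rw [hget, hslice, hmul]
  have hstart : pyStrMulN (dstr 10) (m / 10) ++ dstr (m % 10) = dstr m := by
    rw [strMulN_dstr]; congr 1; exact Nat.div_add_mod m 10
  rw [hstart]
  simp [rowQ, PySem.List.slice?_none_none_neg_one, List.append_assoc]

-- helper: flatMap after map
theorem flatMap_map' {α β γ : Type} (l : List α) (f : α → β) (g : β → List γ) :
    (l.map f).flatMap g = l.flatMap (fun x => g (f x)) := by
  induction l with
  | nil => rfl
  | cons a l ih => simp [ih]

theorem foldA (n : Int) (hn : 0 < n) :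
    (PySem.List.pyRange n 0 (-1)).foldl (pvBodyA n) []
      = (List.range n.toNat).flatMap (fun k => rowQ n (n.toNat - 1 - k) ++ ['\n']) := by
  have hcong : (PySem.List.pyRange n 0 (-1)).foldl (pvBodyA n) []
      = (PySem.List.pyRange n 0 (-1)).foldl
          (fun acc i => acc ++ (rowQ n (i - 1).toNat ++ ['\n'])) [] := by
    refine PySem.List.foldl_congr_mem _ _ _ _ ?_
    intro acc x hx
    exact bodyA_eq n acc x ((PySem.List.mem_pyRange_neg_one.mp hx).1)
  rw [hcong, PySem.List.foldl_append_eq_flatMap]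
  simp only [List.nil_append]
  rw [PySem.List.pyRange_neg_one]
  simp only [Int.sub_zero]
  rw [flatMap_map']
  have harg : ∀ k : Nat, ((n - (k : Int)) - 1).toNat = n.toNat - 1 - k := by
    intro k; omega
  simp only [harg]

theorem foldB (n : Int) (t : Nat) :
    (PySem.List.pyRange 1 ((t : Int) + 1) 1).foldl (pvBodyB n) ([], [])
      = ((List.range t).map (rowQ n), dstr t) := by
  induction t with
  | zero =>
      rw [PySem.List.pyRange_one_eq_nil (by norm_num)]
      simp [dstr]
  | succ t ih =>
      have hc : ((t + 1 : Nat) : Int) + 1 = ((t : Int) + 1) + 1 := by push_cast; ring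
      rw [hc, PySem.List.pyRange_one_succ_right (by omega), List.foldl_append, ih]
      simp only [List.foldl_cons, List.foldl_nil, pvBodyB, PySem.List.len_eq, length_dstr]
      rw [toChars_dch]
      rw [Prod.mk.injEq]
      constructor
      · simp [List.range_succ, rowQ, PySem.List.slice?_none_none_neg_one, List.append_assoc]
      · simp [dstr_succ]

theorem reverse_map_range {α : Type} (f : Nat → α) (N : Nat) :
    ((List.range N).map f).reverse = (List.range N).map (fun k => f (N - 1 - k)) := by
  induction N generalizing f with
  | zero => rfl
  | succ N ih =>
      conv_lhs => rw [List.range_succ_eq_map]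
      conv_rhs => rw [List.range_succ]
      simp only [List.map_cons, List.reverse_cons, List.map_map, List.map_append]
      rw [ih]
      congr 1
      · refine List.map_congr_left ?_
        intro k hk
        have hk' : k < N := List.mem_range.mp hk
        simp only [Function.comp_def]
        congr 1
        omega
      · simp

theorem flatMap_rows (L : List (List Char)) (h : L ≠ []) :
    L.flatMap (fun r => r ++ ['\n']) = PySem.Chars.join ['\n'] L ++ ['\n'] := by
  induction L with
  | nil => exact absurd rfl h
  | cons x L ih =>
      cases L with
      | nil => simp [PySem.Chars.join_singleton]
      | cons y t =>
          rw [List.flatMap_cons, ih (by simp), PySem.Chars.join_cons_cons]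
          simp [List.append_assoc]

theorem rstrip_newline (u : List Char) :
    PySem.Chars.rstrip (u ++ ['\n']) = PySem.Chars.rstrip u := by
  unfold PySem.Chars.rstrip
  rw [List.reverse_append]
  simp [show PySem.Chars.isspace '\n' = true from by decide]

theorem rstrip_one (u : List Char) :
    PySem.Chars.rstrip (u ++ ['1']) = u ++ ['1'] := by
  unfold PySem.Chars.rstrip
  rw [List.reverse_append]
  simp [show PySem.Chars.isspace '1' = false from by decide]

theorem join_last (L : List (List Char)) (x : List Char) :
    ∃ s, PySem.Chars.join ['\n'] (L ++ [x]) = s ++ x := by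
  induction L with
  | nil => exact ⟨[], by simp [PySem.Chars.join_singleton]⟩
  | cons a L ih =>
      cases L with
      | nil => exact ⟨a ++ ['\n'], by
          simp [PySem.Chars.join_cons_cons, PySem.Chars.join_singleton, List.append_assoc]⟩
      | cons b t =>
          obtain ⟨s, hs⟩ := ih
          exact ⟨a ++ '\n' :: s, by
            simp only [List.cons_append, PySem.Chars.join_cons_cons] at *
            simp [hs, List.append_assoc]⟩

theorem rowQ_zero (n : Int) : rowQ n 0 = List.replicate (n - 1).toNat ' ' ++ ['1'] := by
  simp [rowQ, dstr, show dch 0 = '1' from by decide]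

-- ===== VERDICT (by name: the statement is the Claim_ definition above) =====
theorem get_a_down_arrow_of_spec : Claim_equal_get_a_down_arrow_of := by
  intro n _
  unfold Spec_get_a_down_arrow_of get_a_down_arrow_of get_a_down_arrow_of_alt
  by_cases hn : n ≤ 0
  · rw [PySem.List.pyRange_neg_one_eq_nil (by omega), PySem.List.pyRange_one_eq_nil (by omega)]
    simp only [List.foldl_nil]
    rfl
  · have hn : 0 < n := by omega
    have hN1 : 1 ≤ n.toNat := by omega
    rw [foldA n hn, show n + 1 = ((n.toNat : Nat) : Int) + 1 from by omega, foldB n n.toNat]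
    congr 1
    rw [show (List.range n.toNat).flatMap (fun k => rowQ n (n.toNat - 1 - k) ++ ['\n'])
        = (((List.range n.toNat).map (rowQ n)).reverse).flatMap (fun r => r ++ ['\n']) from by
          rw [reverse_map_range, flatMap_map']]
    rw [flatMap_rows _ (by
      simp only [ne_eq, List.reverse_eq_nil_iff, List.map_eq_nil_iff, List.range_eq_nil]
      omega)]
    rw [rstrip_newline]
    obtain ⟨M, hM⟩ : ∃ M, n.toNat = M + 1 := ⟨n.toNat - 1, by omega⟩
    rw [hM, List.range_succ_eq_map, List.map_cons, List.reverse_cons, rowQ_zero]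
    obtain ⟨s, hs⟩ := join_last (((List.range M).map Nat.succ).map (rowQ n)).reverse
      (List.replicate (n - 1).toNat ' ' ++ ['1'])
    rw [hs, show s ++ (List.replicate (n - 1).toNat ' ' ++ ['1'])
        = (s ++ List.replicate (n - 1).toNat ' ') ++ ['1'] from by simp [List.append_assoc]]
    rw [rstrip_one]
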